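-- pv_equiv track=rewrite | github.com/tanghaibao/goatools | goatools/gosubdag/go_edges.py | _init_edges_relationships
-- ===== SOURCE A (Python) =====
-- def _init_edges_relationships(rel2src2dsts, rel2dst2srcs):
--     """Get the directed edges from GO term to GO term using relationships."""
--     edge_rel2fromto = {}
--     relationships = set(rel2src2dsts).union(rel2dst2srcs)
--     for reltype in relationships:
--         edge_from_to = []
--         if reltype in rel2src2dsts:
--             for parent, children in rel2src2dsts[reltype].items():
--                 for child in children:
--                     edge_from_to.append((child, parent))
--         if reltype in rel2dst2srcs:
--             for parent, children in rel2dst2srcs[reltype].items():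
--                 for child in children:
--                     edge_from_to.append((child, parent))
--         edge_rel2fromto[reltype] = edge_from_to
--     return edge_rel2fromto
-- ===== SOURCE B (Python) =====
-- def _init_edges_relationships(rel2src2dsts, rel2dst2srcs):
--     """Get the directed edges from GO term to GO term using relationships."""
--     # Flatten both nested dicts into one (reltype, (child, parent)) edge stream,
--     # then select each relationship type's edges from that stream.
--     edges = [(rel, (child, parent))
--              for dct in (rel2src2dsts, rel2dst2srcs)
--              for rel, sub in dct.items()
--              for parent, children in sub.items()
--              for child in children]
--     return {rel: [edge for r, edge in edges if r == rel]
--             for rel in set(rel2src2dsts).union(rel2dst2srcs)}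
-- ===== Notes on version B (the rewrite author's own statement) =====
-- stated objective: alternative
-- what changed: B flattens both nested dicts once into a single (reltype, edge) stream and then builds each relationship's list by filtering that stream, instead of A's per-reltype gather via membership guards and dict lookups into both nested dicts.
import Mathlib
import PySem

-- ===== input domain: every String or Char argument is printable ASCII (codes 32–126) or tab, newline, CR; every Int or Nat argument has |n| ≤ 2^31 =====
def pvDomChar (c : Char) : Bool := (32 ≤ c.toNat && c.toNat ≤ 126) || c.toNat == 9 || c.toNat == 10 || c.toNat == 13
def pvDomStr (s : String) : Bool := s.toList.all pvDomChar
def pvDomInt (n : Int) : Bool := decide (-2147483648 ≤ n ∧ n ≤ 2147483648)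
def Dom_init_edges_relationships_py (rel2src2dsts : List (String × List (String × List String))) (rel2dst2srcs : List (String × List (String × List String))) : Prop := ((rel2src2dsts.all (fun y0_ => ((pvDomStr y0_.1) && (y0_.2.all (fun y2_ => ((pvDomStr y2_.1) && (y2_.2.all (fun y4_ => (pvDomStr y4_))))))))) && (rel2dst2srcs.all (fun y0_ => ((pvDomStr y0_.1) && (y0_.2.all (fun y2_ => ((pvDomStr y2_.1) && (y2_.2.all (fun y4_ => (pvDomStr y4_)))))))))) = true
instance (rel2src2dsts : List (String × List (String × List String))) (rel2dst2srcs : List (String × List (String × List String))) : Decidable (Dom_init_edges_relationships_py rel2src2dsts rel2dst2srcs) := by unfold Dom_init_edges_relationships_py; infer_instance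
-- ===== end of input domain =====

-- B replaces A's per-relationship gather (key-set loop with membership guards and dict lookups)
-- by flattening both nested dicts once into a single (reltype, edge) stream and filtering that
-- stream per relationship type; return values agree on every pair of well-formed dict encodings
-- (alternative decomposition, no speed claim).


-- ===== PORT A =====
-- A's two identical inner loops: 'for parent, children in sub.items(): for child in children: edge_from_to.append((child, parent))'
def pvAppendEdges (sub : List (String × List String)) (edge_from_to : List (String × String)) : List (String × String) :=
  sub.foldl (fun acc pc => pc.2.foldl (fun acc2 child => acc2 ++ [(child, pc.1)]) acc) edge_from_to

def init_edges_relationships_py (rel2src2dsts : List (String × List (String × List String))) (rel2dst2srcs : List (String × List (String × List String))) : List (String × List (String × String)) :=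
  -- relationships = set(rel2src2dsts).union(rel2dst2srcs)  (iterating a dict yields its keys)
  let relationships := PySem.Set.union (PySem.Set.ofList (rel2src2dsts.map Prod.fst)) (rel2dst2srcs.map Prod.fst)
  (relationships.foldl (fun edge_rel2fromto reltype =>
      -- 'if reltype in d: … d[reltype] …' ported as one match on the lookup
      let e1 := match (PySem.Dict.mk rel2src2dsts).get? reltype with
        | some sub => pvAppendEdges sub []
        | none => []
      let e2 := match (PySem.Dict.mk rel2dst2srcs).get? reltype with
        | some sub => pvAppendEdges sub e1
        | none => e1
      edge_rel2fromto.insert reltype e2) PySem.Dict.empty).items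

-- ===== PORT B =====
-- Source B's quadruple comprehension: one flat (reltype, (child, parent)) stream from one dict
def pvFlatten (d : List (String × List (String × List String))) : List (String × (String × String)) :=
  d.flatMap (fun e => e.2.flatMap (fun pc => pc.2.map (fun child => (e.1, (child, pc.1)))))

def init_edges_relationships_py_alt (rel2src2dsts : List (String × List (String × List String))) (rel2dst2srcs : List (String × List (String × List String))) : List (String × List (String × String)) :=
  -- edges = [...] over (rel2src2dsts, rel2dst2srcs)
  let edges := pvFlatten rel2src2dsts ++ pvFlatten rel2dst2srcs
  -- {rel: [edge for r, edge in edges if r == rel] for rel in set(rel2src2dsts).union(rel2dst2srcs)}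
  let rels := PySem.Set.union (PySem.Set.ofList (rel2src2dsts.map Prod.fst)) (rel2dst2srcs.map Prod.fst)
  (rels.foldl (fun d rel =>
      d.insert rel ((edges.filter (fun t => t.1 == rel)).map Prod.snd)) PySem.Dict.empty).items

-- ===== PRECONDITION & SPEC =====
-- Pre_ excludes association lists with duplicate keys (outer or inner): a Python dict cannot
-- contain duplicate keys, so such lists do not encode any input the Python function receives.
def Pre_init_edges_relationships_py (rel2src2dsts : List (String × List (String × List String))) (rel2dst2srcs : List (String × List (String × List String))) : Prop :=
  (rel2src2dsts.map Prod.fst).Nodup ∧ (rel2dst2srcs.map Prod.fst).Nodup ∧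
  (∀ p ∈ rel2src2dsts, (p.2.map Prod.fst).Nodup) ∧ (∀ p ∈ rel2dst2srcs, (p.2.map Prod.fst).Nodup)
instance (rel2src2dsts : List (String × List (String × List String))) (rel2dst2srcs : List (String × List (String × List String))) : Decidable (Pre_init_edges_relationships_py rel2src2dsts rel2dst2srcs) := by unfold Pre_init_edges_relationships_py; infer_instance

def pvWitness_init_edges_relationships_py : (List (String × List (String × List String))) × (List (String × List (String × List String))) :=
  ([("part_of", [("GO:1", ["GO:2", "GO:3"])])], [("part_of", [("GO:4", ["GO:5"])]), ("regulates", [])])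

def Spec_init_edges_relationships_py (rel2src2dsts : List (String × List (String × List String))) (rel2dst2srcs : List (String × List (String × List String))) (out : List (String × List (String × String))) : Prop := out = init_edges_relationships_py_alt rel2src2dsts rel2dst2srcs
instance (rel2src2dsts : List (String × List (String × List String))) (rel2dst2srcs : List (String × List (String × List String))) (out : List (String × List (String × String))) : Decidable (Spec_init_edges_relationships_py rel2src2dsts rel2dst2srcs out) := by unfold Spec_init_edges_relationships_py; infer_instance

-- ===== CLAIM (what is proved, stated in full; the proofs are below) =====
def Claim_equal_init_edges_relationships_py : Prop := ∀ (rel2src2dsts : List (String × List (String × List String))) (rel2dst2srcs : List (String × List (String × List String))), Dom_init_edges_relationships_py rel2src2dsts rel2dst2srcs → Pre_init_edges_relationships_py rel2src2dsts rel2dst2srcs → Spec_init_edges_relationships_py rel2src2dsts rel2dst2srcs (init_edges_relationships_py rel2src2dsts rel2dst2srcs)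

-- ===== LEMMAS AND PROOFS =====

-- the edge list contributed by one inner dict
def pvEdgesOf (sub : List (String × List String)) : List (String × String) :=
  sub.flatMap (fun pc => pc.2.map (fun child => (child, pc.1)))

-- all edges contributed to key c by an outer association list (concatenating every matching entry)
def pvGather (d : List (String × List (String × List String))) (c : String) : List (String × String) :=
  d.flatMap (fun e => if e.1 = c then pvEdgesOf e.2 else [])

theorem pvAppendEdges_eq (sub : List (String × List String)) (acc : List (String × String)) :
    pvAppendEdges sub acc = acc ++ pvEdgesOf sub := by
  induction sub generalizing acc with
  | nil => simp [pvAppendEdges, pvEdgesOf]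
  | cons pc rest ih =>
      simp only [pvAppendEdges, List.foldl_cons, pvEdgesOf, List.flatMap_cons] at *
      rw [PySem.List.foldl_append_singleton_eq_map, ih, List.append_assoc]

theorem pvGather_of_not_mem (d : List (String × List (String × List String))) (c : String)
    (h : c ∉ d.map Prod.fst) : pvGather d c = [] := by
  induction d with
  | nil => rfl
  | cons e rest ih =>
      simp only [List.map_cons, List.mem_cons, not_or] at h
      simp only [pvGather, List.flatMap_cons]
      rw [if_neg (fun he : e.1 = c => h.1 he.symm), List.nil_append]
      exact ih h.2

theorem pvGet?_eq_gather (d : List (String × List (String × List String))) (c : String)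
    (hnd : (d.map Prod.fst).Nodup) :
    (match (PySem.Dict.mk d).get? c with
      | some sub => pvEdgesOf sub
      | none => []) = pvGather d c := by
  induction d with
  | nil => simp [pvGather, PySem.Dict.get?]
  | cons e rest ih =>
      simp only [List.map_cons, List.nodup_cons] at hnd
      rw [PySem.Dict.get?_mk_cons]
      by_cases hk : e.1 = c
      · subst hk
        have h0 := pvGather_of_not_mem rest e.1 hnd.1
        simp only [pvGather, List.flatMap_cons] at h0 ⊢
        simp [h0]
      · have hb : (e.1 == c) = false := by simp [hk]
        rw [hb]
        simp only [pvGather, List.flatMap_cons, if_neg hk, List.nil_append,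
          Bool.false_eq_true, if_false]
        exact ih hnd.2

-- A's per-relationship value (guarded lookups into both dicts) in closed form
theorem pvAval_eq (r2sd r2ds : List (String × List (String × List String))) (r : String)
    (h1 : (r2sd.map Prod.fst).Nodup) (h2 : (r2ds.map Prod.fst).Nodup) :
    (let e1 := match (PySem.Dict.mk r2sd).get? r with
        | some sub => pvAppendEdges sub []
        | none => ([] : List (String × String))
     match (PySem.Dict.mk r2ds).get? r with
        | some sub => pvAppendEdges sub e1
        | none => e1) = pvGather r2sd r ++ pvGather r2ds r := by
  rw [← pvGet?_eq_gather r2sd r h1, ← pvGet?_eq_gather r2ds r h2]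
  cases hs : (PySem.Dict.mk r2sd).get? r <;> cases ht : (PySem.Dict.mk r2ds).get? r <;>
    simp [pvAppendEdges_eq]

-- B's filter of one inner dict's flattened entries (every stream element carries fst = k)
theorem pvFilter_inner (sub : List (String × List String)) (k r : String) :
    ((sub.flatMap (fun pc => pc.2.map (fun child => (k, (child, pc.1))))).filter
        (fun t => t.1 == r)).map Prod.snd = if k = r then pvEdgesOf sub else [] := by
  induction sub with
  | nil => simp [pvEdgesOf]
  | cons pc rest ih =>
      simp only [List.flatMap_cons, List.filter_append, List.map_append, ih]
      by_cases h : k = r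
      · subst h
        simp [pvEdgesOf, List.flatMap_cons, List.filter_map, Function.comp_def]
      · have hb : (k == r) = false := by simp [h]
        simp [List.filter_map, Function.comp_def, hb, h]

-- B's filter of a whole flattened dict is exactly the gather of that dict
theorem pvFilter_flatten (d : List (String × List (String × List String))) (r : String) :
    ((pvFlatten d).filter (fun t => t.1 == r)).map Prod.snd = pvGather d r := by
  induction d with
  | nil => rfl
  | cons e rest ih =>
      simp only [pvFlatten, pvGather, List.flatMap_cons, List.filter_append, List.map_append] at *
      rw [ih, pvFilter_inner]

-- ===== VERDICT (by name: the statement is the Claim_ definition above) =====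
theorem init_edges_relationships_py_spec : Claim_equal_init_edges_relationships_py := by
  intro r2sd r2ds _ hpre
  obtain ⟨h1, h2, -, -⟩ := hpre
  unfold Spec_init_edges_relationships_py init_edges_relationships_py init_edges_relationships_py_alt
  set rels := PySem.Set.union (PySem.Set.ofList (r2sd.map Prod.fst)) (r2ds.map Prod.fst) with hrels
  have hnd : rels.Nodup := PySem.Set.nodup_union _ _ (PySem.Set.nodup_ofList _)
  have hA := PySem.Dict.items_foldl_insert_fresh rels (fun r => r)
    (fun reltype =>
      let e1 := match (PySem.Dict.mk r2sd).get? reltype with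
        | some sub => pvAppendEdges sub []
        | none => []
      match (PySem.Dict.mk r2ds).get? reltype with
        | some sub => pvAppendEdges sub e1
        | none => e1)
    PySem.Dict.empty (by intro a _; simp [PySem.Dict.contains_empty])
    (by simpa using hnd)
  have hB := PySem.Dict.items_foldl_insert_fresh rels (fun r => r)
    (fun rel => (((pvFlatten r2sd ++ pvFlatten r2ds).filter (fun t => t.1 == rel)).map Prod.snd))
    PySem.Dict.empty (by intro a _; simp [PySem.Dict.contains_empty])
    (by simpa using hnd)
  rw [hA, hB]
  refine List.map_congr_left (fun r _ => ?_)
  dsimp only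
  rw [List.filter_append, List.map_append, pvFilter_flatten, pvFilter_flatten]
  exact congrArg (fun v => (r, v)) (pvAval_eq r2sd r2ds r h1 h2)
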